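-- pv_equiv track=rewrite | github.com/whylucify1/ABC-Fuzzy-string | test case generator/test_case_generator_UID-56.py | remove_matching_word
-- ===== SOURCE A (Python) =====
-- def remove_matching_word(text, word_list):
--     words = text.split()
--     new_words = []
--     match_count = 0
--     for word in reversed(words):
--         if word in word_list and match_count < 2:
--             match_count += 1
--         else:
--             new_words.append(word)
--     if match_count == 2:
--         new_words.reverse()
--         return " ".join(new_words)
--     else:
--         return text
-- ===== SOURCE B (Python) =====
-- def remove_matching_word(text, word_list):
--     words = text.split()
--     total = sum(w in word_list for w in words)
--     if total < 2:
--         return text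
--     seen = 0
--     result = []
--     for w in words:
--         if w in word_list:
--             seen += 1
--             if seen > total - 2:
--                 continue
--         result.append(w)
--     return " ".join(result)
-- ===== Notes on version B (the rewrite author's own statement) =====
-- stated objective: alternative
-- what changed: Replaces the single reversed pass with a bounded counter by a forward two-pass scheme: first count all matches, return text early if fewer than two, then one forward pass that drops exactly the matches whose running ordinal exceeds total-2.
import Mathlib
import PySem

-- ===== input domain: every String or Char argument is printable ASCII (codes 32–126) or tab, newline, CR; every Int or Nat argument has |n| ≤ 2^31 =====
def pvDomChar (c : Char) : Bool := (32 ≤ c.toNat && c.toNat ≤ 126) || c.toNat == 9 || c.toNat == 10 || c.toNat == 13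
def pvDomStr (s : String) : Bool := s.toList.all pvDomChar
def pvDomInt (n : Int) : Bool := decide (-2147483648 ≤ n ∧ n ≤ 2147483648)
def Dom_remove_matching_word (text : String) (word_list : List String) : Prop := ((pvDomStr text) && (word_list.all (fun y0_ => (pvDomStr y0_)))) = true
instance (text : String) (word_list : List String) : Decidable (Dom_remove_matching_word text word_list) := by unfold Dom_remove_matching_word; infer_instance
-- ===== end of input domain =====

-- B replaces A's single reversed pass with a bounded counter by a forward two-pass scheme
-- (count matches first, then drop the matches whose ordinal exceeds total-2); same cost.

-- ===== PORT A =====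
-- literal transliteration of Source A: reversed loop with match_count, append kept words
def remove_matching_word (text : String) (word_list : List String) : String :=
  let words := PySem.Str.split₀ text
  let st := words.reverse.foldl
    (fun (s : List String × Int) word =>
      if word_list.contains word ∧ s.2 < 2 then (s.1, s.2 + 1) else (s.1 ++ [word], s.2))
    ([], 0)
  if st.2 = 2 then PySem.Str.join " " st.1.reverse else text

-- ===== PORT B =====
-- literal transliteration of Source B: total := sum of matches; early return; forward pass with seen
def remove_matching_word_alt (text : String) (word_list : List String) : String :=
  let words := PySem.Str.split₀ text
  let total := words.foldl (fun (acc : Int) w => acc + (if word_list.contains w then 1 else 0)) 0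
  if total < 2 then text
  else
    let st := words.foldl
      (fun (s : Int × List String) w =>
        if word_list.contains w then
          let seen := s.1 + 1
          if seen > total - 2 then (seen, s.2) else (seen, s.2 ++ [w])
        else (s.1, s.2 ++ [w]))
      (0, [])
    PySem.Str.join " " st.2

-- ===== PRECONDITION & SPEC =====
def Spec_remove_matching_word (text : String) (word_list : List String) (out : String) : Prop := out = remove_matching_word_alt text word_list
instance (text : String) (word_list : List String) (out : String) : Decidable (Spec_remove_matching_word text word_list out) := by unfold Spec_remove_matching_word; infer_instance

-- ===== CLAIM (what is proved, stated in full; the proofs are below) =====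
def Claim_equal_remove_matching_word : Prop := ∀ (text : String) (word_list : List String), Dom_remove_matching_word text word_list → Spec_remove_matching_word text word_list (remove_matching_word text word_list)

-- ===== LEMMAS AND PROOFS =====

-- number of matches, as Int
def pvCnt (wl : List String) : List String → Int
  | [] => 0
  | w :: ws => (if wl.contains w then 1 else 0) + pvCnt wl ws

-- drop the first k matches (A's reversed traversal, rephrased with a decrementing budget)
def pvSkip (wl : List String) (k : Int) : List String → List String
  | [] => []
  | w :: ws => if wl.contains w ∧ 0 < k then pvSkip wl (k - 1) ws else w :: pvSkip wl k ws

-- keep the first m matches and every non-match (B's forward traversal)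
def pvFwd (wl : List String) (m : Int) : List String → List String
  | [] => []
  | w :: ws => if wl.contains w then
                 (if 0 < m then w :: pvFwd wl (m - 1) ws else pvFwd wl m ws)
               else w :: pvFwd wl m ws

theorem pvCnt_nonneg (wl l) : 0 ≤ pvCnt wl l := by
  induction l with
  | nil => simp [pvCnt]
  | cons w ws ih => simp only [pvCnt]; split <;> omega

theorem pvCnt_append (wl xs ys) : pvCnt wl (xs ++ ys) = pvCnt wl xs + pvCnt wl ys := by
  induction xs with
  | nil => simp [pvCnt]
  | cons w ws ih => simp only [pvCnt, List.cons_append, ih]; ring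

theorem pvCnt_reverse (wl l) : pvCnt wl l.reverse = pvCnt wl l := by
  induction l with
  | nil => rfl
  | cons w ws ih => simp only [List.reverse_cons, pvCnt_append, pvCnt, ih]; ring

theorem pvSkip_singleton (wl : List String) (k : Int) (w : String) :
    pvSkip wl k [w] = if wl.contains w ∧ 0 < k then [] else [w] := by
  simp only [pvSkip]

-- A's loop, characterised: kept list and final counter (the counter stays ≤ 2 throughout)
theorem pvLoopA (wl : List String) (l : List String) :
    ∀ (acc : List String) (c : Int), c ≤ 2 →
    l.foldl (fun (s : List String × Int) word =>
        if wl.contains word ∧ s.2 < 2 then (s.1, s.2 + 1) else (s.1 ++ [word], s.2)) (acc, c)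
      = (acc ++ pvSkip wl (2 - c) l, c + min (2 - c) (pvCnt wl l)) := by
  induction l with
  | nil =>
    intro acc c hc2
    simp only [List.foldl_nil, pvSkip, pvCnt, List.append_nil, Prod.mk.injEq]
    exact ⟨trivial, by omega⟩
  | cons w ws ih =>
    intro acc c hc2
    have hnn := pvCnt_nonneg wl ws
    simp only [List.foldl_cons, pvSkip, pvCnt]
    cases hw : wl.contains w with
    | true =>
      simp only [true_and, if_true]
      by_cases hc : c < 2
      · have h1 : (0:Int) < 2 - c := by omega
        have e : 2 - c - 1 = 2 - (c + 1) := by omega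
        rw [if_pos hc, if_pos h1, e, ih _ _ (by omega), Prod.mk.injEq]
        exact ⟨rfl, by omega⟩
      · have h1 : ¬ (0:Int) < 2 - c := by omega
        rw [if_neg hc, if_neg h1, ih _ _ hc2, List.append_assoc, Prod.mk.injEq]
        exact ⟨rfl, by omega⟩
    | false =>
      simp only [Bool.false_eq_true, false_and, if_false]
      rw [ih _ _ hc2, List.append_assoc, Prod.mk.injEq]
      exact ⟨rfl, by omega⟩

theorem pvFwd_nonpos (wl : List String) (l : List String) :
    ∀ (m m' : Int), m ≤ 0 → m' ≤ 0 → pvFwd wl m l = pvFwd wl m' l := by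
  induction l with
  | nil => intros; rfl
  | cons w ws ih =>
    intro m m' hm hm'
    simp only [pvFwd]
    cases hw : wl.contains w with
    | true =>
      simp only [if_true]
      have h1 : ¬ (0:Int) < m := by omega
      have h2 : ¬ (0:Int) < m' := by omega
      rw [if_neg h1, if_neg h2, ih m m' hm hm']
    | false =>
      simp only [Bool.false_eq_true, if_false, ih m m' hm hm']

-- B's loop, characterised (stated with the `let` of the port zeta-reduced)
theorem pvLoopB (wl : List String) (t : Int) (l : List String) :
    ∀ (acc : List String) (c : Int),
    l.foldl (fun (s : Int × List String) w =>
        if wl.contains w then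
          (if s.1 + 1 > t - 2 then (s.1 + 1, s.2) else (s.1 + 1, s.2 ++ [w]))
        else (s.1, s.2 ++ [w])) (c, acc)
      = (c + pvCnt wl l, acc ++ pvFwd wl (t - 2 - c) l) := by
  induction l with
  | nil =>
    intro acc c
    simp only [List.foldl_nil, pvFwd, pvCnt, List.append_nil, Prod.mk.injEq]
    exact ⟨by omega, trivial⟩
  | cons w ws ih =>
    intro acc c
    simp only [List.foldl_cons, pvFwd, pvCnt]
    cases hw : wl.contains w with
    | true =>
      simp only [if_true]
      by_cases hs : c + 1 > t - 2
      · have h1 : ¬ (0:Int) < t - 2 - c := by omega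
        rw [if_pos hs, if_neg h1, ih, Prod.mk.injEq,
            pvFwd_nonpos wl ws (t - 2 - (c + 1)) (t - 2 - c) (by omega) (by omega)]
        exact ⟨by omega, rfl⟩
      · have h1 : (0:Int) < t - 2 - c := by omega
        have e : t - 2 - (c + 1) = t - 2 - c - 1 := by omega
        rw [if_neg hs, if_pos h1, ih, e, List.append_assoc, Prod.mk.injEq]
        exact ⟨by omega, rfl⟩
    | false =>
      simp only [Bool.false_eq_true, if_false]
      rw [ih, List.append_assoc, Prod.mk.injEq]
      exact ⟨by omega, rfl⟩

theorem pvSkip_append (wl : List String) (xs : List String) :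
    ∀ (ys : List String) (k : Int),
    pvSkip wl k (xs ++ ys) = pvSkip wl k xs ++ pvSkip wl (k - min (max k 0) (pvCnt wl xs)) ys := by
  induction xs with
  | nil =>
    intro ys k
    simp only [List.nil_append, pvSkip, pvCnt]
    have h : k - min (max k 0) 0 = k := by omega
    rw [h]
  | cons w ws ih =>
    intro ys k
    have hnn := pvCnt_nonneg wl ws
    simp only [List.cons_append, pvSkip, pvCnt]
    cases hw : wl.contains w with
    | true =>
      simp only [true_and, if_true]
      by_cases hk : (0 : Int) < k
      · rw [if_pos hk, if_pos hk, ih]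
        have e : k - 1 - min (max (k - 1) 0) (pvCnt wl ws)
               = k - min (max k 0) (1 + pvCnt wl ws) := by omega
        rw [e]
      · rw [if_neg hk, if_neg hk, ih, List.cons_append]
        have e : k - min (max k 0) (pvCnt wl ws) = k - min (max k 0) (1 + pvCnt wl ws) := by omega
        rw [e]
    | false =>
      simp only [Bool.false_eq_true, false_and, if_false]
      rw [ih, List.cons_append]
      have e : k - min (max k 0) (pvCnt wl ws) = k - min (max k 0) (0 + pvCnt wl ws) := by omega
      rw [e]

-- the bridge: dropping the first k matches of l.reverse = keeping the first cnt-k matches of l, reversed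
theorem pvBridge (wl : List String) (l : List String) :
    ∀ k : Int, 0 ≤ k → pvSkip wl k l.reverse = (pvFwd wl (pvCnt wl l - k) l).reverse := by
  induction l with
  | nil => intros; rfl
  | cons w ws ih =>
    intro k hk
    have hnn := pvCnt_nonneg wl ws
    simp only [List.reverse_cons, pvCnt, pvFwd]
    rw [pvSkip_append wl _ _ k, pvSkip_singleton, pvCnt_reverse]
    cases hw : wl.contains w with
    | true =>
      simp only [true_and, if_true]
      by_cases hm : (0 : Int) < 1 + pvCnt wl ws - k
      · -- w survives: it is not among the last k matches
        have h1 : ¬ (0:Int) < k - min (max k 0) (pvCnt wl ws) := by omega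
        have e : 1 + pvCnt wl ws - k - 1 = pvCnt wl ws - k := by omega
        rw [if_pos hm, if_neg h1, e, List.reverse_cons, ih k hk]
      · -- w is one of the k last matches: dropped
        have h1 : (0:Int) < k - min (max k 0) (pvCnt wl ws) := by omega
        rw [if_neg hm, if_pos h1, List.append_nil, ih k hk,
            pvFwd_nonpos wl ws (pvCnt wl ws - k) (1 + pvCnt wl ws - k) (by omega) (by omega)]
    | false =>
      simp only [Bool.false_eq_true, false_and, if_false, Int.zero_add]
      rw [List.reverse_cons, ih k hk]

theorem pvB_total (wl : List String) (l : List String) :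
    ∀ acc : Int, l.foldl (fun (acc : Int) w => acc + (if wl.contains w then 1 else 0)) acc
      = acc + pvCnt wl l := by
  induction l with
  | nil => intro acc; simp [pvCnt]
  | cons w ws ih => intro acc; simp only [List.foldl_cons, pvCnt, ih]; ring

-- ===== VERDICT (by name: the statement is the Claim_ definition above) =====
theorem remove_matching_word_spec : Claim_equal_remove_matching_word := by
  intro text wl _
  unfold Spec_remove_matching_word remove_matching_word remove_matching_word_alt
  dsimp only
  rw [pvLoopA wl (PySem.Str.split₀ text).reverse [] 0 (by omega),
      pvB_total wl (PySem.Str.split₀ text) 0]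
  have hnn := pvCnt_nonneg wl (PySem.Str.split₀ text)
  rw [pvCnt_reverse]
  simp only [List.nil_append, Int.zero_add, Int.sub_zero]
  by_cases h2 : pvCnt wl (PySem.Str.split₀ text) < 2
  · rw [if_neg (by omega), if_pos h2]
  · rw [if_pos (by omega), if_neg (by omega),
        pvBridge wl (PySem.Str.split₀ text) 2 (by omega),
        pvLoopB wl (pvCnt wl (PySem.Str.split₀ text)) (PySem.Str.split₀ text) [] 0,
        List.reverse_reverse]
    simp
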